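-- pv_equiv track=rewrite | github.com/lacort/Tcp-ip | teste/ModuloUtils.py | splitFields2
-- ===== SOURCE A (Python) =====
-- def splitFields2(message, field):
--     if field == 'Ip':
--         Ip = ''
--         for temp in message[26:30]:
--             Ip = Ip + str(temp) + '.'
--         Ip = Ip.rstrip('.')
--         return Ip
--
--     if field == 'Mask':
--         Mask = ''
--         for temp in message[16:20]:
--             Mask = Mask + str(temp) + '.'
--         Mask = Mask.rstrip('.')
--         return Mask
--
--     if field == 'Gateway':
--         Gateway = ''
--         for temp in message[12:16]:
--             Gateway = Gateway + str(temp) + '.'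
--         Gateway = Gateway.rstrip('.')
--         return Gateway
--
--     if field == 'Mac':
--         Mac = ''
--         for temp in message[20:26]:
--             Mac = Mac + hex(temp).replace('0x', '').upper() + ':'
--         Mac = Mac.rstrip(':')
--         return Mac
--
--     if field == 'Baud':
--         Baud = ''
--         for temp in message[30:32]:
--             Baud = Baud + str(temp) + '.'
--         Baud = Baud.rstrip('.')
--         return Baud
--
--     if field == 'Port':
--         Port = ''
--         for temp in message[32:34]:
--             Port = Port + str(temp) + '.'
--         Port = Port.rstrip('.')
--         return Port
--
--     if field == 'Socket':
--         Socket = str(message[34])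
--         return Socket
--
--     if field == 'Name':
--         Name = ''
--         for temp in message[35:45]:
--             Name += str(temp) + '.'
--         Name = Name.rstrip('.')
--         return Name
-- ===== SOURCE B (Python) =====
-- SPEC = {
--     'Ip':      (26, 30, '.', str),
--     'Mask':    (16, 20, '.', str),
--     'Gateway': (12, 16, '.', str),
--     'Mac':     (20, 26, ':', lambda t: format(t, 'X')),
--     'Baud':    (30, 32, '.', str),
--     'Port':    (32, 34, '.', str),
--     'Name':    (35, 45, '.', str),
-- }
--
--
-- def _render(xs, sep, fmt):
--     # Recursive assembly: the separator is inserted only when something follows,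
--     # so no trailing separator is ever produced (and hence never stripped).
--     if not xs:
--         return ''
--     rest = _render(xs[1:], sep, fmt)
--     if rest == '':
--         return fmt(xs[0])
--     return fmt(xs[0]) + sep + rest
--
--
-- def splitFields2(message, field):
--     if field == 'Socket':
--         return str(message[34])
--     if field in SPEC:
--         lo, hi, sep, fmt = SPEC[field]
--         return _render(message[lo:hi], sep, fmt)
--     return None
-- ===== Notes on version B (the rewrite author's own statement) =====
-- stated objective: alternative
-- what changed: Replaced the eight copy-pasted forward loops that always append a trailing separator and then globally rstrip it by a recursive renderer that builds the string back-to-front, deciding locally at each element whether a separator follows, so no strip-fixup pass exists; field dispatch is a table.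
import Mathlib
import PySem

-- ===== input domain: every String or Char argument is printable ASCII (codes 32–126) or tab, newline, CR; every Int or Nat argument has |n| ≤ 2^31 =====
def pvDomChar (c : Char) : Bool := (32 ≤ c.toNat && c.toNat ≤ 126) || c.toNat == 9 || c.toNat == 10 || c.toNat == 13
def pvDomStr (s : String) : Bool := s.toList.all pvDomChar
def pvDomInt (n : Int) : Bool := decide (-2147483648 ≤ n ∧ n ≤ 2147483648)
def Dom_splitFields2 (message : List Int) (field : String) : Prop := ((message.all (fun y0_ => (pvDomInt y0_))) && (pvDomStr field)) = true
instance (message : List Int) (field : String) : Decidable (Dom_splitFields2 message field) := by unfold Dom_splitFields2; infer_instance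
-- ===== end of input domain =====

-- B replaces A's forward build-then-rstrip loops by a recursive renderer that inserts the separator
-- only when an element follows (no strip pass); same cost, different decomposition.

-- ===== PORT A =====
-- hand port of s.rstrip(c) (one-char argument): drops every trailing copy of c; exact.
def pyRstripChar (s : List Char) (c : Char) : List Char :=
  (s.reverse.dropWhile (· == c)).reverse

-- hand port of hex(n).replace('0x', ''): hex(n) is ('-' for n<0) ++ "0x" ++ lowercase hex digits;
-- the digits contain no 'x', so the replace deletes exactly that one "0x"; exact.
def pyHexNoPrefix (n : Int) : List Char :=
  if n < 0 then '-' :: Nat.toDigits 16 n.natAbs else Nat.toDigits 16 n.toNat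

def splitFields2 (message : List Int) (field : String) : Option String :=
  if field = "Ip" then
    some (String.ofList (pyRstripChar ((PySem.List.slice message (some 26) (some 30)).foldl
      (fun acc temp => acc ++ PySem.Int.toChars temp ++ ['.']) []) '.'))
  else if field = "Mask" then
    some (String.ofList (pyRstripChar ((PySem.List.slice message (some 16) (some 20)).foldl
      (fun acc temp => acc ++ PySem.Int.toChars temp ++ ['.']) []) '.'))
  else if field = "Gateway" then
    some (String.ofList (pyRstripChar ((PySem.List.slice message (some 12) (some 16)).foldl
      (fun acc temp => acc ++ PySem.Int.toChars temp ++ ['.']) []) '.'))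
  else if field = "Mac" then
    some (String.ofList (pyRstripChar ((PySem.List.slice message (some 20) (some 26)).foldl
      (fun acc temp => acc ++ PySem.Chars.upper (pyHexNoPrefix temp) ++ [':']) []) ':'))
  else if field = "Baud" then
    some (String.ofList (pyRstripChar ((PySem.List.slice message (some 30) (some 32)).foldl
      (fun acc temp => acc ++ PySem.Int.toChars temp ++ ['.']) []) '.'))
  else if field = "Port" then
    some (String.ofList (pyRstripChar ((PySem.List.slice message (some 32) (some 34)).foldl
      (fun acc temp => acc ++ PySem.Int.toChars temp ++ ['.']) []) '.'))
  else if field = "Socket" then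
    match PySem.List.pyGet? message 34 with
    | none => none      -- IndexError: excluded by Pre_splitFields2
    | some t => some (PySem.Int.toStr t)
  else if field = "Name" then
    some (String.ofList (pyRstripChar ((PySem.List.slice message (some 35) (some 45)).foldl
      (fun acc temp => acc ++ PySem.Int.toChars temp ++ ['.']) []) '.'))
  else none

-- ===== PORT B =====
-- hand port of format(t, 'X'): uppercase hex digits with a leading '-' for negatives; exact.
def pvFmtHexX (t : Int) : List Char :=
  if t < 0 then '-' :: (Nat.toDigits 16 t.natAbs).map PySem.Chars.upperChar
  else (Nat.toDigits 16 t.toNat).map PySem.Chars.upperChar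

def pvFmtStr (t : Int) : List Char := PySem.Int.toChars t   -- str

-- port of Source B's _render: recursive, inserts sep only when the rest renders nonempty.
def pvRender (xs : List Int) (sep : List Char) (fmt : Int → List Char) : List Char :=
  match xs with
  | [] => []
  | x :: rest =>
      let r := pvRender rest sep fmt
      if r = [] then fmt x else fmt x ++ sep ++ r

def pvSPEC : PySem.Dict String (Int × Int × List Char × (Int → List Char)) :=
  PySem.Dict.ofList
    [("Ip",      (26, 30, ['.'], pvFmtStr)),
     ("Mask",    (16, 20, ['.'], pvFmtStr)),
     ("Gateway", (12, 16, ['.'], pvFmtStr)),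
     ("Mac",     (20, 26, [':'], pvFmtHexX)),
     ("Baud",    (30, 32, ['.'], pvFmtStr)),
     ("Port",    (32, 34, ['.'], pvFmtStr)),
     ("Name",    (35, 45, ['.'], pvFmtStr))]

def splitFields2_alt (message : List Int) (field : String) : Option String :=
  if field = "Socket" then
    match PySem.List.pyGet? message 34 with
    | none => none      -- IndexError: excluded by Pre_splitFields2
    | some t => some (PySem.Int.toStr t)
  else
    match pvSPEC.get? field with
    | some (lo, hi, sep, fmt) =>
        some (String.ofList (pvRender (PySem.List.slice message (some lo) (some hi)) sep fmt))
    | none => none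

-- ===== PRECONDITION & SPEC =====
-- Pre_ excludes only field = "Socket" with fewer than 35 bytes, where A (and B) raise IndexError.
def Pre_splitFields2 (message : List Int) (field : String) : Prop :=
  field = "Socket" → 35 ≤ message.length
instance (message : List Int) (field : String) : Decidable (Pre_splitFields2 message field) := by
  unfold Pre_splitFields2; infer_instance

def pvWitness_splitFields2 : List Int × String := ([192, 168], "Ip")

def Spec_splitFields2 (message : List Int) (field : String) (out : Option String) : Prop := out = splitFields2_alt message field
instance (message : List Int) (field : String) (out : Option String) : Decidable (Spec_splitFields2 message field out) := by unfold Spec_splitFields2; infer_instance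

-- ===== CLAIM (what is proved, stated in full; the proofs are below) =====
def Claim_equal_splitFields2 : Prop := ∀ (message : List Int) (field : String), Dom_splitFields2 message field → Pre_splitFields2 message field → Spec_splitFields2 message field (splitFields2 message field)

-- ===== LEMMAS AND PROOFS =====

lemma digitChar_ge (m : Nat) (h : ¬ m < 16) : Nat.digitChar m = '*' := by
  rw [Nat.digitChar]
  rw [if_neg (by omega), if_neg (by omega), if_neg (by omega), if_neg (by omega),
      if_neg (by omega), if_neg (by omega), if_neg (by omega), if_neg (by omega),
      if_neg (by omega), if_neg (by omega), if_neg (by omega), if_neg (by omega),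
      if_neg (by omega), if_neg (by omega), if_neg (by omega), if_neg (by omega)]

lemma upperChar_digitChar_ne (m : Nat) :
    Nat.digitChar m ≠ '.' ∧ Nat.digitChar m ≠ ':' ∧ PySem.Chars.upperChar (Nat.digitChar m) ≠ ':' := by
  by_cases h : m < 16
  · interval_cases m <;> exact ⟨by decide, by decide, by decide⟩
  · rw [digitChar_ge m h]
    exact ⟨by decide, by decide, by decide⟩

lemma toDigitsCore_mem (b : Nat) :
    ∀ (f n : Nat) (ds : List Char) (c : Char), c ∈ Nat.toDigitsCore b f n ds →
      c ∈ ds ∨ ∃ m, c = Nat.digitChar m := by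
  intro f
  induction f with
  | zero => intro n ds c hc; exact Or.inl hc
  | succ f ih =>
    intro n ds c hc
    rw [Nat.toDigitsCore] at hc
    by_cases h : n / b = 0
    · simp only [h, if_true, List.mem_cons] at hc
      rcases hc with h1 | h1
      · exact Or.inr ⟨n % b, h1⟩
      · exact Or.inl h1
    · simp only [h, if_false] at hc
      rcases ih _ _ _ hc with h1 | h1
      · rcases List.mem_cons.mp h1 with h2 | h2
        · exact Or.inr ⟨n % b, h2⟩
        · exact Or.inl h2
      · exact Or.inr h1

lemma toDigits_mem (b n : Nat) (c : Char) (hc : c ∈ Nat.toDigits b n) :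
    ∃ m, c = Nat.digitChar m := by
  rw [Nat.toDigits] at hc
  rcases toDigitsCore_mem b _ _ _ _ hc with h1 | h1
  · simp at h1
  · exact h1

lemma toDigitsCore_ne_nil (b : Nat) :
    ∀ (f n : Nat) (ds : List Char), ds ≠ [] → Nat.toDigitsCore b f n ds ≠ [] := by
  intro f
  induction f with
  | zero => intro n ds h; simpa [Nat.toDigitsCore] using h
  | succ f ih =>
    intro n ds h
    rw [Nat.toDigitsCore]
    by_cases hb : n / b = 0
    · simp [hb]
    · simp only [hb, if_false]
      exact ih _ _ (by simp)

lemma toDigits_ne_nil (b n : Nat) : Nat.toDigits b n ≠ [] := by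
  rw [Nat.toDigits, Nat.toDigitsCore]
  by_cases hb : n / b = 0
  · simp [hb]
  · simp only [hb, if_false]
    exact toDigitsCore_ne_nil b _ _ _ (by simp)

lemma toChars_good (t : Int) : PySem.Int.toChars t ≠ [] ∧ '.' ∉ PySem.Int.toChars t := by
  unfold PySem.Int.toChars
  split_ifs with h
  · refine ⟨by simp, fun hc => ?_⟩
    rcases List.mem_cons.mp hc with h1 | h1
    · exact absurd h1 (by decide)
    · obtain ⟨m, hm⟩ := toDigits_mem 10 _ _ h1
      exact (upperChar_digitChar_ne m).1 hm.symm
  · refine ⟨toDigits_ne_nil 10 _, fun hc => ?_⟩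
    obtain ⟨m, hm⟩ := toDigits_mem 10 _ _ hc
    exact (upperChar_digitChar_ne m).1 hm.symm

lemma upperTD_good (n : Nat) : ':' ∉ (Nat.toDigits 16 n).map PySem.Chars.upperChar := by
  intro hc
  rcases List.mem_map.mp hc with ⟨c, hc1, hc2⟩
  obtain ⟨m, hm⟩ := toDigits_mem 16 _ _ hc1
  exact (upperChar_digitChar_ne m).2.2 (hm ▸ hc2)

lemma upper_hex_good (t : Int) :
    PySem.Chars.upper (pyHexNoPrefix t) ≠ [] ∧ ':' ∉ PySem.Chars.upper (pyHexNoPrefix t) := by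
  unfold pyHexNoPrefix PySem.Chars.upper
  split_ifs with h
  · refine ⟨by simp, fun hc => ?_⟩
    rw [List.map_cons] at hc
    rcases List.mem_cons.mp hc with h1 | h1
    · exact absurd h1 (by decide)
    · exact upperTD_good _ h1
  · exact ⟨by simpa using toDigits_ne_nil 16 _, upperTD_good _⟩

-- A's per-element Mac rendering equals B's formatter.
lemma upper_hex_eq (t : Int) : PySem.Chars.upper (pyHexNoPrefix t) = pvFmtHexX t := by
  unfold pyHexNoPrefix pvFmtHexX PySem.Chars.upper
  split_ifs
  · simp only [List.map_cons]
    congr 1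
  · rfl

lemma rstrip_append (x y : List Char) (c : Char) (hy : pyRstripChar y c ≠ []) :
    pyRstripChar (x ++ y) c = x ++ pyRstripChar y c := by
  unfold pyRstripChar at *
  rw [List.reverse_append, List.dropWhile_append]
  have : (y.reverse.dropWhile (· == c)).isEmpty = false := by
    cases h : y.reverse.dropWhile (· == c) with
    | nil => exact absurd (by simp [h]) hy
    | cons a l => simp
  rw [this]
  simp

lemma rstrip_single (a : List Char) (c : Char) (hc : c ∉ a) :
    pyRstripChar (a ++ [c]) c = a := by
  unfold pyRstripChar
  rw [List.reverse_append]
  have h1 : a.reverse.dropWhile (· == c) = a.reverse := by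
    rw [List.dropWhile_eq_self_iff]
    intro hl
    have hmem : a.reverse[0] ∈ a := by simpa using List.getElem_mem hl
    simp only [Bool.not_eq_true, beq_eq_false_iff_ne, ne_eq]
    intro h; exact hc (h ▸ hmem)
  simp [h1]

-- the central fact: A's concatenate-with-trailing-separator then rstrip equals the
-- recursive separator-between rendering, for element renderings that are nonempty
-- and never contain the separator.
lemma rstrip_fold_eq_render (sep : Char) (f : Int → List Char)
    (hf : ∀ t, f t ≠ [] ∧ sep ∉ f t) (xs : List Int) :
    pyRstripChar (xs.foldl (fun acc t => acc ++ f t ++ [sep]) []) sep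
      = pvRender xs [sep] f := by
  have key : ∀ ys : List Int, ys ≠ [] →
      pyRstripChar (ys.flatMap (fun t => f t ++ [sep])) sep = pvRender ys [sep] f ∧
      pvRender ys [sep] f ≠ [] := by
    intro ys
    induction ys with
    | nil => intro h; exact absurd rfl h
    | cons a zs ih =>
      intro _
      cases zs with
      | nil =>
        simp only [List.flatMap_cons, List.flatMap_nil, List.append_nil, pvRender]
        exact ⟨rstrip_single (f a) sep (hf a).2, (hf a).1⟩
      | cons b ws =>
        obtain ⟨ih1, ih2⟩ := ih (by simp)
        have hr : pvRender (a :: b :: ws) [sep] f = f a ++ [sep] ++ pvRender (b :: ws) [sep] f := by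
          rw [show pvRender (a :: b :: ws) [sep] f
                = (if pvRender (b :: ws) [sep] f = [] then f a
                   else f a ++ [sep] ++ pvRender (b :: ws) [sep] f) from rfl, if_neg ih2]
        constructor
        · rw [List.flatMap_cons, rstrip_append _ _ _ (by rw [ih1]; exact ih2), ih1, hr]
        · rw [hr]
          simp [(hf a).1]
  rw [show (fun (acc : List Char) (t : Int) => acc ++ f t ++ [sep])
        = (fun acc t => acc ++ (f t ++ [sep])) by funext acc t; rw [List.append_assoc],
      PySem.List.foldl_append_eq_flatMap, List.nil_append]
  cases xs with
  | nil => simp [pyRstripChar, pvRender]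
  | cons a ys => exact (key (a :: ys) (by simp)).1

-- ===== VERDICT (by name: the statement is the Claim_ definition above) =====
theorem splitFields2_spec : Claim_equal_splitFields2 := by
  have hstr : ∀ xs : List Int,
      pyRstripChar (xs.foldl (fun acc temp => acc ++ PySem.Int.toChars temp ++ ['.']) []) '.'
        = pvRender xs ['.'] pvFmtStr :=
    fun xs => rstrip_fold_eq_render '.' PySem.Int.toChars toChars_good xs
  have hmac : ∀ xs : List Int,
      pyRstripChar (xs.foldl (fun acc temp => acc ++ PySem.Chars.upper (pyHexNoPrefix temp) ++ [':']) []) ':'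
        = pvRender xs [':'] pvFmtHexX := by
    intro xs
    rw [rstrip_fold_eq_render ':' _ upper_hex_good xs]
    have : ∀ ys : List Int,
        pvRender ys [':'] (fun t => PySem.Chars.upper (pyHexNoPrefix t)) = pvRender ys [':'] pvFmtHexX := by
      intro ys
      induction ys with
      | nil => rfl
      | cons a zs ih => simp only [pvRender, upper_hex_eq]
    exact this xs
  intro message field _ _
  unfold Spec_splitFields2 splitFields2 splitFields2_alt
  by_cases hsock : field = "Socket"
  · subst hsock; simp
  · simp only [if_neg hsock]
    by_cases h1 : field = "Ip"
    · subst h1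
      rw [if_pos rfl, show pvSPEC.get? "Ip" = some (26, 30, ['.'], pvFmtStr) from rfl, hstr]
    by_cases h2 : field = "Mask"
    · subst h2
      rw [if_neg (by decide), if_pos rfl,
        show pvSPEC.get? "Mask" = some (16, 20, ['.'], pvFmtStr) from rfl, hstr]
    by_cases h3 : field = "Gateway"
    · subst h3
      rw [if_neg (by decide), if_neg (by decide), if_pos rfl,
        show pvSPEC.get? "Gateway" = some (12, 16, ['.'], pvFmtStr) from rfl, hstr]
    by_cases h4 : field = "Mac"
    · subst h4
      rw [if_neg (by decide), if_neg (by decide), if_neg (by decide), if_pos rfl,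
        show pvSPEC.get? "Mac" = some (20, 26, [':'], pvFmtHexX) from rfl, hmac]
    by_cases h5 : field = "Baud"
    · subst h5
      rw [if_neg (by decide), if_neg (by decide), if_neg (by decide), if_neg (by decide),
        if_pos rfl, show pvSPEC.get? "Baud" = some (30, 32, ['.'], pvFmtStr) from rfl, hstr]
    by_cases h6 : field = "Port"
    · subst h6
      rw [if_neg (by decide), if_neg (by decide), if_neg (by decide), if_neg (by decide),
        if_neg (by decide), if_pos rfl,
        show pvSPEC.get? "Port" = some (32, 34, ['.'], pvFmtStr) from rfl, hstr]
    by_cases h7 : field = "Name"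
    · subst h7
      rw [if_neg (by decide), if_neg (by decide), if_neg (by decide), if_neg (by decide),
        if_neg (by decide), if_neg (by decide), if_pos rfl,
        show pvSPEC.get? "Name" = some (35, 45, ['.'], pvFmtStr) from rfl, hstr]
    -- unknown field: A falls through to None, B's lookup misses
    have hget : pvSPEC.get? field = none := by
      rw [PySem.Dict.get?,
        show pvSPEC.items = [("Ip", ((26 : Int), (30 : Int), ['.'], pvFmtStr)),
          ("Mask", (16, 20, ['.'], pvFmtStr)), ("Gateway", (12, 16, ['.'], pvFmtStr)),
          ("Mac", (20, 26, [':'], pvFmtHexX)), ("Baud", (30, 32, ['.'], pvFmtStr)),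
          ("Port", (32, 34, ['.'], pvFmtStr)), ("Name", (35, 45, ['.'], pvFmtStr))] from rfl,
        List.find?_cons_of_neg (by simp [Ne.symm h1]),
        List.find?_cons_of_neg (by simp [Ne.symm h2]),
        List.find?_cons_of_neg (by simp [Ne.symm h3]),
        List.find?_cons_of_neg (by simp [Ne.symm h4]),
        List.find?_cons_of_neg (by simp [Ne.symm h5]),
        List.find?_cons_of_neg (by simp [Ne.symm h6]),
        List.find?_cons_of_neg (by simp [Ne.symm h7])]
      rfl
    rw [if_neg h1, if_neg h2, if_neg h3, if_neg h4, if_neg h5, if_neg h6, if_neg h7, hget]
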